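-- pv_equiv track=rewrite | github.com/midstar/AoC | 2024/08B.py | get_antinodesPP
-- ===== SOURCE A (Python) =====
-- def get_antinodesPP(pos1, pos2, r_max, c_max):
--     result = {pos1, pos2}
--     r1, c1 = pos1
--     r2, c2 = pos2
--     ard = (r2 - r1)
--     acd = (c2 - c1)
--     ar = ard + r2
--     ac = acd + c2
--     while ar >= 0 and ar <= r_max and ac >= 0 and ac <= c_max:
--         result.add((ar, ac))
--         ar += ard
--         ac += acd
--     return result
-- ===== SOURCE B (Python) =====
-- def _axis_steps(d, s, m):
--     # max count of consecutive k >= 1 with 0 <= s + k*d <= m (None = unbounded)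
--     if d == 0:
--         return None if 0 <= s <= m else 0
--     if d > 0:
--         return 0 if s + d < 0 else max(0, (m - s) // d)
--     return 0 if s + d > m else max(0, s // (-d))
--
--
-- def get_antinodesPP(pos1, pos2, r_max, c_max):
--     r1, c1 = pos1
--     r2, c2 = pos2
--     ard = r2 - r1
--     acd = c2 - c1
--     nr = _axis_steps(ard, r2, r_max)
--     nc = _axis_steps(acd, c2, c_max)
--     if nr is None:
--         n = 0 if nc is None else nc
--     elif nc is None:
--         n = nr
--     else:
--         n = min(nr, nc)
--     result = {pos1, pos2}
--     result.update((r2 + k * ard, c2 + k * acd) for k in range(1, n + 1))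
--     return result
-- ===== Notes on version B (the rewrite author's own statement) =====
-- stated objective: alternative
-- what changed: B replaces A's bounds-testing while-loop march with a closed-form per-axis step count (floor division) and then generates the collinear points directly with range(1, n+1).
import Mathlib
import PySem

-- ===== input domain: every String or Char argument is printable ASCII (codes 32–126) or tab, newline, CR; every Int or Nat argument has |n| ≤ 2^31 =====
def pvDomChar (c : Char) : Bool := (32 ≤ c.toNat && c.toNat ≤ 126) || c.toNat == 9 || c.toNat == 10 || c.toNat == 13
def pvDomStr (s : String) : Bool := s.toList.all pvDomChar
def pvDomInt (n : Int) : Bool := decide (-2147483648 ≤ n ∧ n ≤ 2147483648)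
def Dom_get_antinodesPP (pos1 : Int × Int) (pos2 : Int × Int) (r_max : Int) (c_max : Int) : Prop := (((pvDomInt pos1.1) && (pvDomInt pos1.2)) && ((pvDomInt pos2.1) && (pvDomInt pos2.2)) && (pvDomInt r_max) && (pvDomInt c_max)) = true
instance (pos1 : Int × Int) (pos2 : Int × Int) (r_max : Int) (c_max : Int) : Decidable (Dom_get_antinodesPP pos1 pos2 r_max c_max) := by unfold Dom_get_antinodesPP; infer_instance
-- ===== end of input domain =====

-- B replaces A's bounds-testing while-loop march with a closed-form per-axis step count and direct
-- point generation over range(1, n+1) (objective: alternative decomposition).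

-- ===== PORT A =====
-- A's while loop; the Nat fuel only makes the recursion total — on every input admitted by
-- Pre_get_antinodesPP the loop terminates well before the fuel runs out (proved below).
def pvLoopA (fuel : Nat) (result : PySem.Set (Int × Int)) (ar ac ard acd r_max c_max : Int) :
    PySem.Set (Int × Int) :=
  match fuel with
  | 0 => result
  | fuel + 1 =>
    if 0 ≤ ar ∧ ar ≤ r_max ∧ 0 ≤ ac ∧ ac ≤ c_max then
      pvLoopA fuel (PySem.Set.add result (ar, ac)) (ar + ard) (ac + acd) ard acd r_max c_max
    else result

def get_antinodesPP (pos1 : Int × Int) (pos2 : Int × Int) (r_max : Int) (c_max : Int) : List (Int × Int) :=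
  let result := PySem.Set.ofList [pos1, pos2]
  let r1 := pos1.1; let c1 := pos1.2
  let r2 := pos2.1; let c2 := pos2.2
  let ard := r2 - r1
  let acd := c2 - c1
  let ar := ard + r2
  let ac := acd + c2
  pvLoopA (r_max.toNat + c_max.toNat + 4) result ar ac ard acd r_max c_max

-- ===== PORT B =====
-- max count of consecutive k ≥ 1 with 0 ≤ s + k*d ≤ m (none = unbounded)
def pvAxisSteps (d s m : Int) : Option Int :=
  if d = 0 then (if 0 ≤ s ∧ s ≤ m then none else some 0)
  else if 0 < d then (if s + d < 0 then some 0 else some (max 0 (PySem.Int.floordiv (m - s) d)))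
  else (if s + d > m then some 0 else some (max 0 (PySem.Int.floordiv s (-d))))

def get_antinodesPP_alt (pos1 : Int × Int) (pos2 : Int × Int) (r_max : Int) (c_max : Int) : List (Int × Int) :=
  let r1 := pos1.1; let c1 := pos1.2
  let r2 := pos2.1; let c2 := pos2.2
  let ard := r2 - r1
  let acd := c2 - c1
  let nr := pvAxisSteps ard r2 r_max
  let nc := pvAxisSteps acd c2 c_max
  let n : Int :=
    match nr, nc with
    | none, none => 0
    | none, some b => b
    | some a, none => a
    | some a, some b => min a b
  (PySem.List.pyRange 1 (n + 1) 1).foldl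
    (fun s k => PySem.Set.add s (r2 + k * ard, c2 + k * acd))
    (PySem.Set.ofList [pos1, pos2])

-- ===== PRECONDITION & SPEC =====
-- Pre_ excludes exactly the inputs on which A's while loop never terminates (Python A hangs):
-- pos1 = pos2 with the (then fixed) probe point inside the bounds.
def Pre_get_antinodesPP (pos1 : Int × Int) (pos2 : Int × Int) (r_max : Int) (c_max : Int) : Prop :=
  ¬ (pos1 = pos2 ∧ 0 ≤ pos2.1 ∧ pos2.1 ≤ r_max ∧ 0 ≤ pos2.2 ∧ pos2.2 ≤ c_max)
instance (pos1 : Int × Int) (pos2 : Int × Int) (r_max : Int) (c_max : Int) : Decidable (Pre_get_antinodesPP pos1 pos2 r_max c_max) := by unfold Pre_get_antinodesPP; infer_instance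

def pvWitness_get_antinodesPP : (Int × Int) × (Int × Int) × Int × Int := ((0, 0), (1, 2), 7, 9)

def Spec_get_antinodesPP (pos1 : Int × Int) (pos2 : Int × Int) (r_max : Int) (c_max : Int) (out : List (Int × Int)) : Prop := out = get_antinodesPP_alt pos1 pos2 r_max c_max
instance (pos1 : Int × Int) (pos2 : Int × Int) (r_max : Int) (c_max : Int) (out : List (Int × Int)) : Decidable (Spec_get_antinodesPP pos1 pos2 r_max c_max out) := by unfold Spec_get_antinodesPP; infer_instance

-- ===== CLAIM (what is proved, stated in full; the proofs are below) =====
def Claim_equal_get_antinodesPP : Prop := ∀ (pos1 : Int × Int) (pos2 : Int × Int) (r_max : Int) (c_max : Int), Dom_get_antinodesPP pos1 pos2 r_max c_max → Pre_get_antinodesPP pos1 pos2 r_max c_max → Spec_get_antinodesPP pos1 pos2 r_max c_max (get_antinodesPP pos1 pos2 r_max c_max)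

-- ===== LEMMAS AND PROOFS =====

-- "step k of the march stays inside this axis' bounds"
def pvInB (d s m k : Int) : Prop := 0 ≤ s + k * d ∧ s + k * d ≤ m

lemma pvAxisSteps_none {d s m : Int} (h : pvAxisSteps d s m = none) :
    d = 0 ∧ ∀ k : Int, pvInB d s m k := by
  unfold pvAxisSteps at h
  split_ifs at h with h0 h1
  all_goals simp_all [pvInB]

lemma pvAxisSteps_some {d s m a : Int} (h : pvAxisSteps d s m = some a) :
    0 ≤ a ∧ (∀ k : Int, 1 ≤ k → k ≤ a → pvInB d s m k) ∧ ¬ pvInB d s m (a + 1) := by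
  unfold pvAxisSteps at h
  by_cases h0 : d = 0
  · subst h0
    rw [if_pos rfl] at h
    by_cases h1 : 0 ≤ s ∧ s ≤ m
    · rw [if_pos h1] at h; cases h
    · rw [if_neg h1] at h
      injection h with h; subst h
      refine ⟨by omega, fun k hk1 hk2 => absurd (hk1.trans hk2) (by norm_num), ?_⟩
      simp only [pvInB, mul_zero, add_zero]
      omega
  · rw [if_neg h0] at h
    by_cases h2 : 0 < d
    · rw [if_pos h2] at h
      by_cases h3 : s + d < 0
      · rw [if_pos h3] at h
        injection h with h; subst h
        refine ⟨by omega, fun k hk1 hk2 => absurd (hk1.trans hk2) (by norm_num), ?_⟩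
        simp only [pvInB, zero_add, one_mul]
        omega
      · rw [if_neg h3] at h
        injection h with h; subst h
        have hq : ∀ k : Int, k ≤ PySem.Int.floordiv (m - s) d ↔ k * d ≤ m - s :=
          fun k => PySem.Int.le_floordiv_iff_mul_le h2
        refine ⟨le_max_left _ _, ?_, ?_⟩
        · intro k hk1 hk2
          have hkq : k ≤ PySem.Int.floordiv (m - s) d := by
            rcases le_max_iff.mp hk2 with hk | hk
            · omega
            · exact hk
          have hkd : k * d ≤ m - s := (hq k).mp hkq
          have hpos : 1 * d ≤ k * d := mul_le_mul_of_nonneg_right hk1 (by omega)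
          have he : (1 : Int) * d = d := one_mul d
          exact ⟨by omega, by omega⟩
        · intro hc
          simp only [pvInB] at hc
          have h5 : (max 0 (PySem.Int.floordiv (m - s) d) + 1) * d ≤ m - s := by omega
          have h6 := (hq _).mpr h5
          have h7 := le_max_right 0 (PySem.Int.floordiv (m - s) d)
          omega
    · rw [if_neg h2] at h
      by_cases h4 : s + d > m
      · rw [if_pos h4] at h
        injection h with h; subst h
        refine ⟨by omega, fun k hk1 hk2 => absurd (hk1.trans hk2) (by norm_num), ?_⟩
        simp only [pvInB, zero_add, one_mul]
        omega
      · rw [if_neg h4] at h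
        injection h with h; subst h
        have hdneg : 0 < -d := by omega
        have hq : ∀ k : Int, k ≤ PySem.Int.floordiv s (-d) ↔ k * (-d) ≤ s :=
          fun k => PySem.Int.le_floordiv_iff_mul_le hdneg
        refine ⟨le_max_left _ _, ?_, ?_⟩
        · intro k hk1 hk2
          have hkq : k ≤ PySem.Int.floordiv s (-d) := by
            rcases le_max_iff.mp hk2 with hk | hk
            · omega
            · exact hk
          have hkd : k * (-d) ≤ s := (hq k).mp hkq
          have he1 : k * (-d) = -(k * d) := by ring
          have hneg : k * d ≤ 1 * d := mul_le_mul_of_nonpos_right hk1 (by omega)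
          have he : (1 : Int) * d = d := one_mul d
          exact ⟨by omega, by omega⟩
        · intro hc
          simp only [pvInB] at hc
          have he1 : (max 0 (PySem.Int.floordiv s (-d)) + 1) * (-d)
              = -((max 0 (PySem.Int.floordiv s (-d)) + 1) * d) := by ring
          have h5 : (max 0 (PySem.Int.floordiv s (-d)) + 1) * (-d) ≤ s := by omega
          have h6 := (hq _).mpr h5
          have h7 := le_max_right 0 (PySem.Int.floordiv s (-d))
          omega

-- a finite axis count bounds the number of steps by m + 1
lemma pvN_le {d s m n a : Int} (h : pvAxisSteps d s m = some a) (hn1 : 1 ≤ n) (hna : n ≤ a)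
    (hall : ∀ k : Int, 1 ≤ k → k ≤ n → pvInB d s m k) : n ≤ m + 1 := by
  have hd : d ≠ 0 := by
    intro h0; subst h0
    rw [pvAxisSteps, if_pos rfl] at h
    by_cases hb : 0 ≤ s ∧ s ≤ m
    · rw [if_pos hb] at h; cases h
    · rw [if_neg hb] at h; injection h with h; omega
  have hA := hall 1 le_rfl hn1
  have hB := hall n hn1 le_rfl
  simp only [pvInB, one_mul] at hA hB
  rcases lt_or_gt_of_ne hd with hneg | hpos
  · have h5 : n - 1 ≤ (n - 1) * (-d) := le_mul_of_one_le_right (by omega) (by omega)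
    have he : s + n * d = (s + d) - (n - 1) * (-d) := by ring
    omega
  · have h5 : n - 1 ≤ (n - 1) * d := le_mul_of_one_le_right (by omega) (by omega)
    have he : s + n * d = (s + d) + (n - 1) * d := by ring
    omega

-- A's loop, started at step j+1 with t in-bounds steps remaining, is the fold over range(j+1, j+1+t)
lemma pvLoop_eq (r2 c2 ard acd r_max c_max : Int) :
    ∀ (t fuel : Nat) (j : Int) (acc : PySem.Set (Int × Int)),
      (∀ k : Int, j + 1 ≤ k → k ≤ j + t → pvInB ard r2 r_max k ∧ pvInB acd c2 c_max k) →
      ¬ (pvInB ard r2 r_max (j + t + 1) ∧ pvInB acd c2 c_max (j + t + 1)) →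
      t < fuel →
      pvLoopA fuel acc (r2 + (j + 1) * ard) (c2 + (j + 1) * acd) ard acd r_max c_max
        = (PySem.List.pyRange (j + 1) (j + 1 + t) 1).foldl
            (fun s k => PySem.Set.add s (r2 + k * ard, c2 + k * acd)) acc := by
  intro t
  induction t with
  | zero =>
    intro fuel j acc h1 h2 hf
    obtain ⟨f, rfl⟩ : ∃ f, fuel = f + 1 := ⟨fuel - 1, by omega⟩
    have hj : (j + ((0 : Nat) : Int) + 1) = j + 1 := by push_cast; ring
    rw [hj] at h2
    simp only [pvInB] at h2
    rw [pvLoopA, if_neg (fun hc => h2 ⟨⟨hc.1, hc.2.1⟩, hc.2.2.1, hc.2.2.2⟩)]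
    rw [PySem.List.pyRange_one_eq_nil (by push_cast; omega)]
    rfl
  | succ t ih =>
    intro fuel j acc h1 h2 hf
    obtain ⟨f, rfl⟩ : ∃ f, fuel = f + 1 := ⟨fuel - 1, by omega⟩
    have hb := h1 (j + 1) (le_refl _) (by push_cast; omega)
    simp only [pvInB] at hb
    rw [pvLoopA, if_pos ⟨hb.1.1, hb.1.2, hb.2.1, hb.2.2⟩]
    rw [PySem.List.pyRange_one_cons (by push_cast; omega), List.foldl_cons]
    have harr : r2 + (j + 1) * ard + ard = r2 + ((j + 1) + 1) * ard := by ring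
    have hacc : c2 + (j + 1) * acd + acd = c2 + ((j + 1) + 1) * acd := by ring
    rw [harr, hacc]
    have hend : j + 1 + ((t.succ : Nat) : Int) = (j + 1) + 1 + (t : Int) := by push_cast; ring
    rw [hend]
    exact ih f (j + 1)
      (PySem.Set.add acc (r2 + (j + 1) * ard, c2 + (j + 1) * acd))
      (fun k hk1 hk2 => h1 k (by omega) (by push_cast at hk2 ⊢; omega))
      (by
        intro hc
        apply h2
        have : j + ((t.succ : Nat) : Int) + 1 = j + 1 + (t : Int) + 1 := by push_cast; ring
        rw [this]
        exact hc)
      (by omega)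

-- glue: for a given n with the three characteristic facts, A's run equals B's fold
lemma pvMain (r1 c1 r2 c2 r_max c_max n : Int)
    (hn0 : 0 ≤ n)
    (h1 : ∀ k : Int, 1 ≤ k → k ≤ n →
      pvInB (r2 - r1) r2 r_max k ∧ pvInB (c2 - c1) c2 c_max k)
    (h2 : ¬ (pvInB (r2 - r1) r2 r_max (n + 1) ∧ pvInB (c2 - c1) c2 c_max (n + 1)))
    (hfuel : n.toNat < r_max.toNat + c_max.toNat + 4) :
    pvLoopA (r_max.toNat + c_max.toNat + 4) (PySem.Set.ofList [(r1, c1), (r2, c2)])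
        (r2 - r1 + r2) (c2 - c1 + c2) (r2 - r1) (c2 - c1) r_max c_max
      = (PySem.List.pyRange 1 (n + 1) 1).foldl
          (fun s k => PySem.Set.add s (r2 + k * (r2 - r1), c2 + k * (c2 - c1)))
          (PySem.Set.ofList [(r1, c1), (r2, c2)]) := by
  have key := pvLoop_eq r2 c2 (r2 - r1) (c2 - c1) r_max c_max n.toNat
    (r_max.toNat + c_max.toNat + 4) 0 (PySem.Set.ofList [(r1, c1), (r2, c2)])
    (fun k hk1 hk2 => h1 k (by omega) (by omega))
    (by
      intro hc
      apply h2
      have : (0 : Int) + (n.toNat : Int) + 1 = n + 1 := by omega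
      rw [this] at hc
      exact hc)
    hfuel
  have hst1 : r2 + ((0 : Int) + 1) * (r2 - r1) = r2 - r1 + r2 := by ring
  have hst2 : c2 + ((0 : Int) + 1) * (c2 - c1) = c2 - c1 + c2 := by ring
  rw [hst1, hst2] at key
  have hrng : (0 : Int) + 1 + (n.toNat : Int) = n + 1 := by omega
  rw [hrng] at key
  have hlo : ((0 : Int) + 1) = 1 := by ring
  rw [hlo] at key
  exact key

-- ===== VERDICT (by name: the statement is the Claim_ definition above) =====
theorem get_antinodesPP_spec : Claim_equal_get_antinodesPP := by
  intro pos1 pos2 r_max c_max _ hpre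
  obtain ⟨r1, c1⟩ := pos1
  obtain ⟨r2, c2⟩ := pos2
  unfold Pre_get_antinodesPP at hpre
  unfold Spec_get_antinodesPP get_antinodesPP get_antinodesPP_alt
  simp only
  cases hnr : pvAxisSteps (r2 - r1) r2 r_max with
  | none =>
    cases hnc : pvAxisSteps (c2 - c1) c2 c_max with
    | none =>
      -- both axes unbounded: pos1 = pos2 and in bounds — excluded by Pre_
      obtain ⟨hr0, hrall⟩ := pvAxisSteps_none hnr
      obtain ⟨hc0, hcall⟩ := pvAxisSteps_none hnc
      have hr := hrall 0
      have hc := hcall 0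
      simp only [pvInB, zero_mul, add_zero] at hr hc
      exact absurd ⟨by simp [Prod.ext_iff]; omega, hr.1, hr.2, hc.1, hc.2⟩ hpre
    | some b =>
      obtain ⟨hr0, hrall⟩ := pvAxisSteps_none hnr
      obtain ⟨hb0, hball, hbtop⟩ := pvAxisSteps_some hnc
      apply pvMain r1 c1 r2 c2 r_max c_max b hb0
        (fun k hk1 hk2 => ⟨hrall k, hball k hk1 hk2⟩)
        (fun hc => hbtop hc.2)
      by_cases hb1 : 1 ≤ b
      · have := pvN_le hnc hb1 le_rfl hball
        omega
      · omega
  | some a =>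
    obtain ⟨ha0, haall, hatop⟩ := pvAxisSteps_some hnr
    cases hnc : pvAxisSteps (c2 - c1) c2 c_max with
    | none =>
      obtain ⟨hc0, hcall⟩ := pvAxisSteps_none hnc
      apply pvMain r1 c1 r2 c2 r_max c_max a ha0
        (fun k hk1 hk2 => ⟨haall k hk1 hk2, hcall k⟩)
        (fun hc => hatop hc.1)
      by_cases ha1 : 1 ≤ a
      · have := pvN_le hnr ha1 le_rfl haall
        omega
      · omega
    | some b =>
      obtain ⟨hb0, hball, hbtop⟩ := pvAxisSteps_some hnc
      apply pvMain r1 c1 r2 c2 r_max c_max (min a b) (le_min ha0 hb0)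
        (fun k hk1 hk2 => ⟨haall k hk1 (by omega), hball k hk1 (by omega)⟩)
        (by
          intro hc
          rcases le_total a b with hab | hab
          · have : min a b = a := by omega
            rw [this] at hc
            exact hatop hc.1
          · have : min a b = b := by omega
            rw [this] at hc
            exact hbtop hc.2)
      by_cases h1 : 1 ≤ min a b
      · have := pvN_le hnr h1 (by omega) (fun k hk1 hk2 => haall k hk1 (by omega))
        omega
      · omega
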